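-- pv_equiv track=rewrite | github.com/Domiko7/competitive-programming | practice/logia/L17/etap_2/3.py | kolit
-- ===== SOURCE A (Python) =====
-- def kolit(napis):
--     wiersze = [[]]
--     j = 1
--     for i in range(len(napis)):
--         wiersze[-1].append(napis[i])
--         if len(wiersze[-1]) >= j:
--             j += 1
--             wiersze.append([])
--     wystapienia = {}
--     counter = 0
--     for i in range(len(wiersze)):
--         for j, l in enumerate(wiersze[i]):
--             if j not in wystapienia:
--                 wystapienia[j] = l
--                 counter += 1
--             if l != wystapienia[j] and wystapienia[j] != ():
--                 wystapienia[j] = ()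
--                 counter -= 1
--
--     return counter
-- ===== SOURCE B (Python) =====
-- def kolit(napis):
--     columns = {}
--     col, cap = 0, 1
--     for ch in napis:
--         columns.setdefault(col, []).append(ch)
--         col += 1
--         if col == cap:
--             col, cap = 0, cap + 1
--     return sum(1 for chars in columns.values() if len(set(chars)) == 1)
-- ===== Notes on version B (the rewrite author's own statement) =====
-- stated objective: simpler
-- what changed: B drops A's explicit row-matrix build and fused sentinel-dict scan: it assigns each character its triangular column index in one pass with a col/cap counter pair, groups characters per column in a dict, then counts the columns whose character set has size 1.
import Mathlib
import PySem

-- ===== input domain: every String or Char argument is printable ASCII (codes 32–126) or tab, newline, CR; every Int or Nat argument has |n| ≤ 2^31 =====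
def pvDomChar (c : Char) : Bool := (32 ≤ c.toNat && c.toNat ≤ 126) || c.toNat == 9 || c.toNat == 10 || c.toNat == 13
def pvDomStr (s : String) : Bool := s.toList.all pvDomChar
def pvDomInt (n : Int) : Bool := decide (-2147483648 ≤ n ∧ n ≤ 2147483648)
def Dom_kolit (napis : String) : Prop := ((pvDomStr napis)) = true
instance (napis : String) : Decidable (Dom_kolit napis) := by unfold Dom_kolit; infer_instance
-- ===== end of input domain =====

-- B replaces A's row-matrix build + fused sentinel-dict scan by a direct one-pass grouping of
-- characters into triangular columns followed by a count of all-equal columns (objective: simpler).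

-- ===== PORT A =====
-- wiersze[-1].append(napis[i]) : rebuild the list with the char appended to its last row
def pvAppendLast : List (List Char) → Char → List (List Char)
  | [], _ => []
  | [r], c => [r ++ [c]]
  | r :: s :: rs, c => r :: pvAppendLast (s :: rs) c

-- len(wiersze[-1])
def pvLastLen : List (List Char) → Nat
  | [] => 0
  | [r] => r.length
  | _ :: s :: rs => pvLastLen (s :: rs)

-- body of A's first loop, state (wiersze, j)
def pvBuildStep (st : List (List Char) × Int) (c : Char) : List (List Char) × Int :=
  let w := pvAppendLast st.1 c
  if st.2 ≤ (pvLastLen w : Int) then (w ++ [[]], st.2 + 1) else (w, st.2)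

-- body of A's inner loop, state (wystapienia, counter); the sentinel () is modelled as `none`,
-- a stored character as `some c` (wystapienia[j] is read with getD — the key is always present there)
def pvStepA (st : PySem.Dict Int (Option Char) × Int) (jl : Int × Char) :
    PySem.Dict Int (Option Char) × Int :=
  let st1 := if st.1.contains jl.1 = false then (st.1.insert jl.1 (some jl.2), st.2 + 1) else st
  if some jl.2 ≠ st1.1.getD jl.1 none ∧ st1.1.getD jl.1 none ≠ none
  then (st1.1.insert jl.1 none, st1.2 - 1) else st1

def kolit (napis : String) : Int :=
  let built := napis.toList.foldl pvBuildStep ([([] : List Char)], 1)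
  let res := built.1.foldl (fun st row => (PySem.List.enumerate row).foldl pvStepA st)
      ((PySem.Dict.empty : PySem.Dict Int (Option Char)), (0 : Int))
  res.2

-- ===== PORT B =====
-- body of B's loop, state (columns, col, cap); columns.setdefault(col, []).append(ch) is Dict.modify
def pvStepB (st : PySem.Dict Int (List Char) × Int × Int) (ch : Char) :
    PySem.Dict Int (List Char) × Int × Int :=
  let d := st.1.modify st.2.1 [] (· ++ [ch])
  let col := st.2.1 + 1
  if col = st.2.2 then (d, 0, st.2.2 + 1) else (d, col, st.2.2)

def kolit_alt (napis : String) : Int :=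
  let st := napis.toList.foldl pvStepB ((PySem.Dict.empty : PySem.Dict Int (List Char)), 0, 1)
  ((st.1.values.filter (fun chars => (PySem.Set.ofList chars).length == 1)).length : Int)

-- ===== PRECONDITION & SPEC =====
def Spec_kolit (napis : String) (out : Int) : Prop := out = kolit_alt napis
instance (napis : String) (out : Int) : Decidable (Spec_kolit napis out) := by
  unfold Spec_kolit; infer_instance

-- ===== CLAIM (what is proved, stated in full; the proofs are below) =====
def Claim_equal_kolit : Prop := ∀ (napis : String), Dom_kolit napis → Spec_kolit napis (kolit napis)

-- ===== LEMMAS AND PROOFS =====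

-- the common spine: each character paired with its triangular column index
def pvTri : List Char → Int → Int → List (Int × Char)
  | [], _, _ => []
  | c :: cs, col, cap =>
      (col, c) :: (if col + 1 = cap then pvTri cs 0 (cap + 1) else pvTri cs (col + 1) cap)

def pvEnumFlat (w : List (List Char)) : List (Int × Char) :=
  (w.map (fun r => PySem.List.enumerate r)).flatten

def pvGStep (d : PySem.Dict Int (List Char)) (p : Int × Char) : PySem.Dict Int (List Char) :=
  d.insert p.1 (d.getD p.1 [] ++ [p.2])

def pvUniformOf : List Char → Option Char
  | [] => none
  | c :: rest => if rest.all (· == c) then some c else none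

def pvCountU (d : PySem.Dict Int (List Char)) : Int :=
  ((d.items.countP (fun p => (pvUniformOf p.2).isSome) : Nat) : Int)

lemma pvAppendLast_ne_nil (w : List (List Char)) (hw : w ≠ []) (c : Char) :
    pvAppendLast w c ≠ [] := by
  match w with
  | [] => exact absurd rfl hw
  | [r] => simp [pvAppendLast]
  | r :: s :: rs => simp [pvAppendLast]

lemma pvLastLen_appendLast (w : List (List Char)) (hw : w ≠ []) (c : Char) :
    pvLastLen (pvAppendLast w c) = pvLastLen w + 1 := by
  match w with
  | [] => exact absurd rfl hw
  | [r] => simp [pvAppendLast, pvLastLen]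
  | r :: s :: rs =>
    simp only [pvAppendLast]
    rw [show pvLastLen (r :: pvAppendLast (s :: rs) c) = pvLastLen (pvAppendLast (s :: rs) c) from ?_]
    · exact pvLastLen_appendLast (s :: rs) (by simp) c
    · have := pvAppendLast_ne_nil (s :: rs) (by simp) c
      match h : pvAppendLast (s :: rs) c with
      | [] => exact absurd h this
      | x :: xs => simp [pvLastLen]

lemma pvEnumFlat_appendLast (w : List (List Char)) (hw : w ≠ []) (c : Char) :
    pvEnumFlat (pvAppendLast w c) = pvEnumFlat w ++ [((pvLastLen w : Int), c)] := by
  match w with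
  | [] => exact absurd rfl hw
  | [r] =>
    simp [pvAppendLast, pvEnumFlat, pvLastLen, PySem.List.enumerate_append,
      PySem.List.enumerate_cons, PySem.List.enumerate_nil]
  | r :: s :: rs =>
    have ih := pvEnumFlat_appendLast (s :: rs) (by simp) c
    simp only [pvAppendLast, pvEnumFlat, List.map_cons, List.flatten_cons, pvLastLen] at *
    rw [ih]; simp [List.append_assoc]

lemma pvEnumFlat_append_nil (w : List (List Char)) :
    pvEnumFlat (w ++ [[]]) = pvEnumFlat w := by
  simp [pvEnumFlat, PySem.List.enumerate_nil]

lemma pvLastLen_append_nil (w : List (List Char)) : pvLastLen (w ++ [[]]) = 0 := by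
  match w with
  | [] => simp [pvLastLen]
  | [r] => simp [pvLastLen]
  | r :: s :: rs =>
    have := pvLastLen_append_nil (s :: rs)
    simpa [pvLastLen] using this

lemma pvBuild_enumFlat (cs : List Char) : ∀ (w : List (List Char)) (j : Int), w ≠ [] →
    (pvLastLen w : Int) < j →
    pvEnumFlat ((cs.foldl pvBuildStep (w, j)).1) = pvEnumFlat w ++ pvTri cs (pvLastLen w) j := by
  induction cs with
  | nil => intro w j hw hj; simp [pvTri]
  | cons c cs ih =>
    intro w j hw hj
    simp only [List.foldl_cons]
    have hw' := pvAppendLast_ne_nil w hw c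
    have hL := pvLastLen_appendLast w hw c
    by_cases hcond : j ≤ (pvLastLen (pvAppendLast w c) : Int)
    · have hj' : (pvLastLen w : Int) + 1 = j := by rw [hL] at hcond; push_cast at hcond ⊢; omega
      rw [show pvBuildStep (w, j) c = (pvAppendLast w c ++ [[]], j + 1) from by
        simp [pvBuildStep, hcond]]
      rw [ih _ _ (by simp) (by rw [pvLastLen_append_nil]; push_cast; omega)]
      rw [pvEnumFlat_append_nil, pvEnumFlat_appendLast w hw c, pvLastLen_append_nil]
      rw [pvTri, if_pos hj']
      simp [List.append_assoc]
    · have hj2 : (pvLastLen (pvAppendLast w c) : Int) < j := lt_of_not_ge hcond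
      rw [show pvBuildStep (w, j) c = (pvAppendLast w c, j) from by simp [pvBuildStep, hcond]]
      rw [ih _ _ hw' hj2]
      rw [pvEnumFlat_appendLast w hw c, hL]
      have hne : ¬ ((pvLastLen w : Int) + 1 = j) := by rw [hL] at hj2; push_cast at hj2; omega
      rw [pvTri, if_neg hne]
      push_cast
      simp [List.append_assoc]

lemma pvKolit_eq_fold_tri (napis : String) :
    kolit napis =
      ((pvTri napis.toList 0 1).foldl pvStepA
        ((PySem.Dict.empty : PySem.Dict Int (Option Char)), (0 : Int))).2 := by
  have hfold : ∀ (w : List (List Char)) (init : PySem.Dict Int (Option Char) × Int),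
      w.foldl (fun st row => (PySem.List.enumerate row).foldl pvStepA st) init
        = (pvEnumFlat w).foldl pvStepA init := by
    intro w init
    rw [pvEnumFlat, List.foldl_flatten, List.foldl_map]
  have hbuild := pvBuild_enumFlat napis.toList [[]] 1 (by simp) (by simp [pvLastLen])
  simp only [kolit]
  rw [hfold, hbuild]
  simp [pvEnumFlat, PySem.List.enumerate_nil, pvLastLen]

lemma pvStepB_fold (cs : List Char) : ∀ (d : PySem.Dict Int (List Char)) (col cap : Int),
    (cs.foldl pvStepB (d, col, cap)).1 = (pvTri cs col cap).foldl pvGStep d := by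
  induction cs with
  | nil => intro d col cap; simp [pvTri]
  | cons ch cs ih =>
    intro d col cap
    by_cases h : col + 1 = cap
    · simp only [List.foldl_cons, pvStepB, pvTri, if_pos h, pvGStep, PySem.Dict.modify]
      rw [ih]
    · simp only [List.foldl_cons, pvStepB, pvTri, if_neg h, pvGStep, PySem.Dict.modify]
      rw [ih]

lemma pvNeNil_gfold (ps : List (Int × Char)) (d : PySem.Dict Int (List Char))
    (h : ∀ l ∈ d.values, l ≠ []) : ∀ l ∈ (ps.foldl pvGStep d).values, l ≠ [] := by
  induction ps generalizing d with
  | nil => exact h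
  | cons p ps ih =>
    simp only [List.foldl_cons]
    refine ih (pvGStep d p) ?_
    intro l hl
    rcases PySem.Dict.mem_values_insert d p.1 (d.getD p.1 [] ++ [p.2]) l hl with h1 | h1
    · subst h1; simp
    · exact h l h1

lemma pvCountP_map_update (l : List (Int × List Char)) (j : Int) (w l0 : List Char)
    (q : List Char → Bool) (hnd : (l.map Prod.fst).Nodup) (hmem : (j, l0) ∈ l) :
    (l.map (fun p => if p.1 == j then (j, w) else p)).countP (fun p => q p.2)
        + (if q l0 then 1 else 0)
      = l.countP (fun p => q p.2) + (if q w then 1 else 0) := by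
  induction l with
  | nil => simp at hmem
  | cons p l ih =>
    simp only [List.map_cons, List.nodup_cons] at hnd
    rcases List.mem_cons.mp hmem with hp | hp
    · subst hp
      have hmap : List.map (fun p => if p.1 == j then (j, w) else p) l = l := by
        calc List.map (fun p => if p.1 == j then (j, w) else p) l
            = List.map id l := by
              apply List.map_congr_left
              intro x hx
              have hx1 : x.1 ≠ j := by
                intro hxe
                exact hnd.1 (hxe ▸ (List.mem_map_of_mem hx : x.1 ∈ l.map Prod.fst))
              simp [hx1]
          _ = l := List.map_id l
      simp only [List.map_cons, beq_self_eq_true, if_pos, hmap, List.countP_cons]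
      omega
    · have hj : p.1 ≠ j := by
        intro he
        exact hnd.1 (he ▸ (List.mem_map_of_mem hp : ((j, l0) : Int × List Char).1 ∈ l.map Prod.fst))
      have hj' : (p.1 == j) = false := by simp [hj]
      have ihr := ih hnd.2 hp
      simp only [List.map_cons, List.countP_cons, hj', Bool.false_eq_true, if_false]
      omega

lemma pvUniformOf_append_same (l : List Char) (a : Char) (h : pvUniformOf l = some a) :
    pvUniformOf (l ++ [a]) = some a := by
  match l with
  | [] => simp [pvUniformOf] at h
  | c :: rest =>
    simp only [pvUniformOf] at h
    by_cases hall : rest.all (· == c)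
    · rw [if_pos hall] at h
      obtain rfl : c = a := by simpa using h
      simp only [List.cons_append, pvUniformOf]
      rw [if_pos (by simp [List.all_append, hall])]
    · rw [if_neg hall] at h; exact absurd h (by simp)

lemma pvUniformOf_append_ne (l : List Char) (a c : Char) (h : pvUniformOf l = some a)
    (hc : c ≠ a) : pvUniformOf (l ++ [c]) = none := by
  match l with
  | [] => simp [pvUniformOf] at h
  | c' :: rest =>
    simp only [pvUniformOf] at h
    by_cases hall : rest.all (· == c')
    · rw [if_pos hall] at h
      obtain rfl : c' = a := by simpa using h
      simp only [List.cons_append, pvUniformOf]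
      rw [if_neg (by simp [List.all_append, hc])]
    · rw [if_neg hall] at h; exact absurd h (by simp)

lemma pvUniformOf_append_none (l : List Char) (c : Char) (hl : l ≠ [])
    (h : pvUniformOf l = none) : pvUniformOf (l ++ [c]) = none := by
  match l with
  | [] => exact absurd rfl hl
  | c' :: rest =>
    simp only [pvUniformOf] at h
    by_cases hall : rest.all (· == c')
    · rw [if_pos hall] at h; exact absurd h (by simp)
    · simp only [List.cons_append, pvUniformOf]
      rw [if_neg]
      simp only [List.all_append] at *
      simp [hall]

lemma pvCountN_insert_mem (dB : PySem.Dict Int (List Char)) (j : Int) (l0 v : List Char)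
    (q : List Char → Bool) (hnd : dB.keys.Nodup) (hget : dB.get? j = some l0) :
    (dB.insert j v).items.countP (fun p => q p.2) + (if q l0 then 1 else 0)
      = dB.items.countP (fun p => q p.2) + (if q v then 1 else 0) := by
  have hc : dB.contains j = true := by
    rw [PySem.Dict.contains_eq_isSome_get?, hget]; rfl
  have hmem : (j, l0) ∈ dB.items := PySem.Dict.mem_items_of_get?_eq_some dB hget
  rw [PySem.Dict.items_insert_of_contains dB v hc]
  exact pvCountP_map_update dB.items j v l0 q hnd hmem

lemma pvCountN_insert_fresh (dB : PySem.Dict Int (List Char)) (j : Int) (v : List Char)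
    (q : List Char → Bool) (hc : dB.contains j = false) :
    (dB.insert j v).items.countP (fun p => q p.2)
      = dB.items.countP (fun p => q p.2) + (if q v then 1 else 0) := by
  rw [PySem.Dict.items_insert_of_not_contains dB v hc]
  simp [List.countP_append, List.countP_cons]

lemma pvCore (ps : List (Int × Char)) :
    ∀ (dA : PySem.Dict Int (Option Char)) (dB : PySem.Dict Int (List Char)) (counter : Int),
    dA.keys = dB.keys → dB.keys.Nodup →
    (∀ k, dA.getD k none = pvUniformOf (dB.getD k [])) →
    (∀ l ∈ dB.values, l ≠ []) →
    counter = pvCountU dB →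
    (ps.foldl pvStepA (dA, counter)).2 = pvCountU (ps.foldl pvGStep dB) := by
  induction ps with
  | nil => intro dA dB counter _ _ _ _ hc; simpa using hc
  | cons p ps ih =>
    rintro dA dB counter hk hnd hv hne hc
    obtain ⟨j, c⟩ := p
    simp only [List.foldl_cons]
    have hcont : dA.contains j = dB.contains j := by
      rw [PySem.Dict.contains_eq_decide_mem_keys, PySem.Dict.contains_eq_decide_mem_keys, hk]
    have hg : pvGStep dB (j, c) = dB.insert j (dB.getD j [] ++ [c]) := rfl
    by_cases hmem : j ∈ dB.keys
    · -- the column is already present on both sides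
      have hcB : dB.contains j = true := by
        rw [PySem.Dict.contains_eq_decide_mem_keys]; simp [hmem]
      have hcA : dA.contains j = true := by rw [hcont]; exact hcB
      have hsome : (dB.get? j).isSome := by rw [← PySem.Dict.contains_eq_isSome_get?, hcB]
      obtain ⟨l0, hget⟩ := Option.isSome_iff_exists.mp hsome
      have hl0 : dB.getD j [] = l0 := PySem.Dict.getD_of_get?_eq_some dB [] hget
      have hl0mem : l0 ∈ dB.values := by
        have := PySem.Dict.mem_items_of_get?_eq_some dB hget
        exact List.mem_map_of_mem this
      have hl0ne : l0 ≠ [] := hne l0 hl0mem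
      have hkeep : (dB.insert j (l0 ++ [c])).keys = dB.keys :=
        PySem.Dict.keys_insert_of_contains dB (l0 ++ [c]) hcB
      have hAget : dA.getD j none = pvUniformOf l0 := by rw [hv j, hl0]
      rw [hg, hl0]
      cases huni : pvUniformOf l0 with
      | some a =>
        by_cases hca : c = a
        · subst hca
          have hstep : pvStepA (dA, counter) (j, c) = (dA, counter) := by
            simp [pvStepA, hcA, hAget, huni]
          rw [hstep]
          refine ih dA (dB.insert j (l0 ++ [c])) counter ?_ ?_ ?_ ?_ ?_
          · rw [hkeep]; exact hk
          · rw [hkeep]; exact hnd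
          · intro k
            rw [PySem.Dict.getD_insert]
            by_cases hkj : k = j
            · subst hkj
              rw [if_pos rfl, hAget, huni, pvUniformOf_append_same l0 c huni]
            · rw [if_neg hkj]; exact hv k
          · intro l hl
            rcases PySem.Dict.mem_values_insert dB j (l0 ++ [c]) l hl with h1 | h1
            · subst h1; simp
            · exact hne l h1
          · have := pvCountN_insert_mem dB j l0 (l0 ++ [c])
              (fun l => (pvUniformOf l).isSome) hnd hget
            simp only [huni, pvUniformOf_append_same l0 c huni,
              Option.isSome_some, if_true] at this
            unfold pvCountU at hc ⊢
            omega
        · have hstep : pvStepA (dA, counter) (j, c) = (dA.insert j none, counter - 1) := by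
            simp [pvStepA, hcA, hAget, huni, hca]
          rw [hstep]
          refine ih (dA.insert j none) (dB.insert j (l0 ++ [c])) (counter - 1) ?_ ?_ ?_ ?_ ?_
          · rw [hkeep, PySem.Dict.keys_insert_of_contains dA none hcA]; exact hk
          · rw [hkeep]; exact hnd
          · intro k
            rw [PySem.Dict.getD_insert, PySem.Dict.getD_insert]
            by_cases hkj : k = j
            · subst hkj
              rw [if_pos rfl, if_pos rfl, pvUniformOf_append_ne l0 a c huni hca]
            · rw [if_neg hkj, if_neg hkj]; exact hv k
          · intro l hl
            rcases PySem.Dict.mem_values_insert dB j (l0 ++ [c]) l hl with h1 | h1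
            · subst h1; simp
            · exact hne l h1
          · have := pvCountN_insert_mem dB j l0 (l0 ++ [c])
              (fun l => (pvUniformOf l).isSome) hnd hget
            simp only [huni, pvUniformOf_append_ne l0 a c huni hca] at this
            simp at this
            unfold pvCountU at hc ⊢
            omega
      | none =>
        have hstep : pvStepA (dA, counter) (j, c) = (dA, counter) := by
          simp [pvStepA, hcA, hAget, huni]
        rw [hstep]
        refine ih dA (dB.insert j (l0 ++ [c])) counter ?_ ?_ ?_ ?_ ?_
        · rw [hkeep]; exact hk
        · rw [hkeep]; exact hnd
        · intro k
          rw [PySem.Dict.getD_insert]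
          by_cases hkj : k = j
          · subst hkj
            rw [if_pos rfl, hAget, huni, pvUniformOf_append_none l0 c hl0ne huni]
          · rw [if_neg hkj]; exact hv k
        · intro l hl
          rcases PySem.Dict.mem_values_insert dB j (l0 ++ [c]) l hl with h1 | h1
          · subst h1; simp
          · exact hne l h1
        · have := pvCountN_insert_mem dB j l0 (l0 ++ [c])
            (fun l => (pvUniformOf l).isSome) hnd hget
          simp only [huni, pvUniformOf_append_none l0 c hl0ne huni] at this
          simp at this
          unfold pvCountU at hc ⊢
          omega
    · -- a fresh column: A inserts the character and counts it, B starts the list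
      have hcB : dB.contains j = false := by
        rw [PySem.Dict.contains_eq_decide_mem_keys]; simp [hmem]
      have hcA : dA.contains j = false := by rw [hcont]; exact hcB
      have hl0 : dB.getD j [] = [] := PySem.Dict.getD_of_not_contains dB [] hcB
      have hstep : pvStepA (dA, counter) (j, c) = (dA.insert j (some c), counter + 1) := by
        simp [pvStepA, hcA, PySem.Dict.getD_insert_self]
      rw [hstep, hg, hl0]
      simp only [List.nil_append]
      refine ih (dA.insert j (some c)) (dB.insert j [c]) (counter + 1) ?_ ?_ ?_ ?_ ?_
      · rw [PySem.Dict.keys_insert_of_not_contains dA (some c) hcA,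
          PySem.Dict.keys_insert_of_not_contains dB [c] hcB, hk]
      · exact PySem.Dict.nodup_keys_insert dB j [c] hnd
      · intro k
        rw [PySem.Dict.getD_insert, PySem.Dict.getD_insert]
        by_cases hkj : k = j
        · subst hkj
          rw [if_pos rfl, if_pos rfl]
          simp [pvUniformOf]
        · rw [if_neg hkj, if_neg hkj]; exact hv k
      · intro l hl
        rcases PySem.Dict.mem_values_insert dB j [c] l hl with h1 | h1
        · subst h1; simp
        · exact hne l h1
      · have := pvCountN_insert_fresh dB j [c] (fun l => (pvUniformOf l).isSome) hcB
        have hcsome : pvUniformOf [c] = some c := by simp [pvUniformOf]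
        simp only [hcsome, Option.isSome_some, if_true] at this
        unfold pvCountU at hc ⊢
        omega

lemma pvLen_le_foldl_add (l : List Char) : ∀ (s : PySem.Set Char),
    s.length ≤ (l.foldl PySem.Set.add s).length := by
  induction l with
  | nil => intro s; simp
  | cons x l ih =>
    intro s
    refine le_trans ?_ (ih (PySem.Set.add s x))
    simp only [PySem.Set.add]
    split
    · exact le_refl _
    · simp

lemma pvFoldl_add_len_one (rest : List Char) : ∀ (c : Char),
    ((rest.foldl PySem.Set.add [c]).length = 1 ↔ rest.all (· == c) = true) := by
  induction rest with
  | nil => intro c; simp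
  | cons x rest ih =>
    intro c
    by_cases hx : x = c
    · subst hx
      simp only [List.foldl_cons, List.all_cons, beq_self_eq_true, Bool.true_and]
      rw [show PySem.Set.add [x] x = [x] from by simp [PySem.Set.add, PySem.Set.contains]]
      exact ih x
    · simp only [List.foldl_cons, List.all_cons]
      rw [show PySem.Set.add [c] x = [c, x] from by
        simp [PySem.Set.add, PySem.Set.contains, hx]]
      have h2 := pvLen_le_foldl_add rest [c, x]
      constructor
      · intro h
        simp only [List.length_cons, List.length_nil] at h2
        omega
      · intro h; simp [hx] at h

lemma pvSetLen_one_iff (l : List Char) (hl : l ≠ []) :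
    (((PySem.Set.ofList l).length == 1) : Bool) = (pvUniformOf l).isSome := by
  match l with
  | [] => exact absurd rfl hl
  | c :: rest =>
    have h1 := pvFoldl_add_len_one rest c
    have hofl : PySem.Set.ofList (c :: rest) = rest.foldl PySem.Set.add [c] := by
      simp [PySem.Set.ofList, PySem.Set.empty, PySem.Set.add, PySem.Set.contains]
    have h2 : (pvUniformOf (c :: rest)).isSome = rest.all (· == c) := by
      cases hb : rest.all (· == c) <;> simp [pvUniformOf, hb]
    rw [h2, hofl]
    cases hb : rest.all (· == c) with
    | true => simp [h1.mpr hb]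
    | false =>
      rw [beq_eq_false_iff_ne]
      intro hcon
      exact absurd (h1.mp hcon) (by rw [hb]; simp)

-- ===== VERDICT (by name: the statement is the Claim_ definition above) =====
theorem kolit_spec : Claim_equal_kolit := by
  intro napis _
  show kolit napis = kolit_alt napis
  rw [pvKolit_eq_fold_tri]
  simp only [kolit_alt]
  rw [pvStepB_fold]
  have hinit_nodup : (PySem.Dict.empty : PySem.Dict Int (List Char)).keys.Nodup := by
    simp [PySem.Dict.keys_empty]
  have hinit_ne : ∀ l ∈ (PySem.Dict.empty : PySem.Dict Int (List Char)).values, l ≠ [] := by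
    simp [PySem.Dict.values, PySem.Dict.empty]
  rw [pvCore (pvTri napis.toList 0 1) PySem.Dict.empty PySem.Dict.empty 0 rfl hinit_nodup
    (fun k => by simp [PySem.Dict.getD_empty, pvUniformOf]) hinit_ne
    (by simp [pvCountU, PySem.Dict.empty])]
  have hnn := pvNeNil_gfold (pvTri napis.toList 0 1) PySem.Dict.empty hinit_ne
  unfold pvCountU
  congr 1
  rw [show ((pvTri napis.toList 0 1).foldl pvGStep PySem.Dict.empty).values
      = ((pvTri napis.toList 0 1).foldl pvGStep PySem.Dict.empty).items.map Prod.snd from rfl]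
  rw [← List.countP_eq_length_filter, List.countP_map]
  apply List.countP_congr
  intro p hp
  have hpv : p.2 ∈ ((pvTri napis.toList 0 1).foldl pvGStep PySem.Dict.empty).values :=
    List.mem_map_of_mem hp
  have hpne : p.2 ≠ [] := hnn p.2 hpv
  have := pvSetLen_one_iff p.2 hpne
  simp only [Function.comp_apply]
  rw [this]
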